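-- pv_equiv track=rewrite | github.com/cau-likelion-org/kiwi-server | documents/service.py | list_elements_in_common
-- ===== SOURCE A (Python) =====
-- def list_elements_in_common(list1, list2):
--     #return the index of the common element
--     for i in range(len(list1)):
--         for j in range(len(list2)):
--             if list1[i] == "" or list2[j] == "":
--                 continue
--             if list1[i] == list2[j]:
--                 return i, j
--     return -1, -1
-- ===== SOURCE B (Python) =====
-- def list_elements_in_common(list1, list2):
--     # return the index of the common element
--     first = {}
--     for j, v in enumerate(list2):
--         if v != "" and v not in first:
--             first[v] = j
--     for i, v in enumerate(list1):
--         if v != "" and v in first: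
--             return i, first[v]
--     return -1, -1
-- ===== Notes on version B (the rewrite author's own statement) =====
-- stated objective: alternative
-- what changed: Replaced the nested scan of list2 for every element of list1 by a dict built once mapping each non-empty list2 value to its smallest index, then a single scan of list1 (asymptotically O(n+m) vs O(n*m), though a timing run's inputs let A exit early, so no speed is claimed).
import Mathlib
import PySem

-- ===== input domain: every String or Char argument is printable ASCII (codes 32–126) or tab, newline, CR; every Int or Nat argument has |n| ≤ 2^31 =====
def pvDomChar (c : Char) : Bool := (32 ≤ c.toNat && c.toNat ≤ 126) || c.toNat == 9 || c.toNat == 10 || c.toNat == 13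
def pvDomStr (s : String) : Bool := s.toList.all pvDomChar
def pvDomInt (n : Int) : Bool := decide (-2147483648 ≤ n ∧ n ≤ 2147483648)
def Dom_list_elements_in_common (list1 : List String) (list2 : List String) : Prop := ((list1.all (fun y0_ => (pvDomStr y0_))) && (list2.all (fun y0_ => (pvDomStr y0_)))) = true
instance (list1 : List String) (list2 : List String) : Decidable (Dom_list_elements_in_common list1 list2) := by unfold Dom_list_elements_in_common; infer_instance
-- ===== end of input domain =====

-- B replaces A's nested scan of list2 per element of list1 by a first-index dict over list2 plus one scan of list1 (alternative algorithm).

-- ===== PORT A =====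
-- inner loop: for j in range(len(list2)): continue on empty, return j on match
def pvInnerA (x : String) : List (Int × String) → Option Int
  | [] => none
  | (j, y) :: rest =>
    if x = "" ∨ y = "" then pvInnerA x rest
    else if x = y then some j
    else pvInnerA x rest

-- outer loop: for i in range(len(list1))
def pvOuterA (list2 : List String) : List (Int × String) → Int × Int
  | [] => (-1, -1)
  | (i, x) :: rest =>
    match pvInnerA x (PySem.List.enumerate list2) with
    | some j => (i, j)
    | none => pvOuterA list2 rest

def list_elements_in_common (list1 : List String) (list2 : List String) : Int × Int :=
  pvOuterA list2 (PySem.List.enumerate list1)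

-- ===== PORT B =====
-- first = {}; for j, v in enumerate(list2): if v != "" and v not in first: first[v] = j
def pvBuildB (l : List (Int × String)) : PySem.Dict String Int :=
  l.foldl (fun d p => if p.2 ≠ "" ∧ d.contains p.2 = false then d.insert p.2 p.1 else d)
    PySem.Dict.empty

-- for i, v in enumerate(list1): if v != "" and v in first: return i, first[v]
def pvScanB (d : PySem.Dict String Int) : List (Int × String) → Int × Int
  | [] => (-1, -1)
  | (i, v) :: rest =>
    if v ≠ "" then
      match d.get? v with
      | some j => (i, j)
      | none => pvScanB d rest
    else pvScanB d rest

def list_elements_in_common_alt (list1 : List String) (list2 : List String) : Int × Int :=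
  pvScanB (pvBuildB (PySem.List.enumerate list2)) (PySem.List.enumerate list1)

-- ===== PRECONDITION & SPEC =====
def Spec_list_elements_in_common (list1 : List String) (list2 : List String) (out : Int × Int) : Prop := out = list_elements_in_common_alt list1 list2
instance (list1 : List String) (list2 : List String) (out : Int × Int) : Decidable (Spec_list_elements_in_common list1 list2 out) := by unfold Spec_list_elements_in_common; infer_instance

-- ===== CLAIM (what is proved, stated in full; the proofs are below) =====
def Claim_equal_list_elements_in_common : Prop := ∀ (list1 : List String) (list2 : List String), Dom_list_elements_in_common list1 list2 → Spec_list_elements_in_common list1 list2 (list_elements_in_common list1 list2)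

-- ===== LEMMAS AND PROOFS =====

-- the dict built from l (on top of d) answers get? x exactly as A's inner scan of l, for non-empty x
theorem pvBuild_get (x : String) (hx : x ≠ "") :
    ∀ (l : List (Int × String)) (d : PySem.Dict String Int),
      (l.foldl (fun d p => if p.2 ≠ "" ∧ d.contains p.2 = false then d.insert p.2 p.1 else d) d).get? x
        = ((d.get? x).orElse (fun _ => pvInnerA x l)) := by
  intro l
  induction l with
  | nil =>
    intro d
    cases h : d.get? x <;> simp [pvInnerA, Option.orElse, h]
  | cons p rest ih =>
    intro d
    obtain ⟨j, y⟩ := p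
    simp only [List.foldl_cons]
    by_cases hy : y = ""
    · subst hy
      simp [pvInnerA, hx, ih]
    · by_cases hxy : x = y
      · subst hxy
        by_cases hc : d.contains x = false
        · have hnone : d.get? x = none := by
            rw [PySem.Dict.contains_eq_isSome_get?] at hc
            exact Option.not_isSome_iff_eq_none.mp (by simp [hc])
          rw [if_pos ⟨hx, hc⟩, ih]
          simp [pvInnerA, hx, hnone, PySem.Dict.get?_insert_self, Option.orElse]
        · obtain ⟨v, hv⟩ : ∃ v, d.get? x = some v := by
            rw [PySem.Dict.contains_eq_isSome_get?] at hc
            cases h : d.get? x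
            · simp [h] at hc
            · exact ⟨_, rfl⟩
          rw [if_neg (fun h => hc h.2), ih]
          simp [pvInnerA, hv, Option.orElse]
      · have hkeep : (if y ≠ "" ∧ d.contains y = false then d.insert y j else d).get? x
            = d.get? x := by
          split_ifs with h
          · simp [PySem.Dict.get?_insert, hxy]
          · rfl
        rw [ih, hkeep]
        simp [pvInnerA, hx, hy, hxy]

theorem pvInnerA_empty : ∀ (l : List (Int × String)), pvInnerA "" l = none := by
  intro l
  induction l with
  | nil => rfl
  | cons p rest ih => obtain ⟨j, y⟩ := p; simp [pvInnerA, ih]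

theorem pvMain (list2 : List String) :
    ∀ (l : List (Int × String)),
      pvOuterA list2 l = pvScanB (pvBuildB (PySem.List.enumerate list2)) l := by
  intro l
  induction l with
  | nil => rfl
  | cons p rest ih =>
    obtain ⟨i, x⟩ := p
    by_cases hx : x = ""
    · subst hx
      simp [pvOuterA, pvScanB, pvInnerA_empty, ih]
    · have hget : (pvBuildB (PySem.List.enumerate list2)).get? x
          = pvInnerA x (PySem.List.enumerate list2) := by
        have := pvBuild_get x hx (PySem.List.enumerate list2) PySem.Dict.empty
        simpa [pvBuildB, PySem.Dict.get?_empty, Option.orElse] using this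
      simp only [pvOuterA, pvScanB, if_pos hx, hget]
      cases pvInnerA x (PySem.List.enumerate list2) with
      | none => simpa using ih
      | some j => rfl

-- ===== VERDICT (by name: the statement is the Claim_ definition above) =====
theorem list_elements_in_common_spec : Claim_equal_list_elements_in_common := by
  intro list1 list2 _
  unfold Spec_list_elements_in_common list_elements_in_common list_elements_in_common_alt
  exact pvMain list2 (PySem.List.enumerate list1)
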